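-- pv_equiv track=rewrite | github.com/skmr2177/sketchup_qa_agents | utils/categorize_qa.py | _determine_layout_category
-- ===== SOURCE A (Python) =====
-- from typing import Tuple, Optional
--
-- def _determine_layout_category(content: str, filename: str) -> Tuple[str, str, str]:
--     """Determine LayOut category based on content"""
--
--     if any(keyword in content or keyword in filename for keyword in [
--         'clipping mask', 'template', 'scrapbook', 'auto text'
--     ]):
--         return 'LayOut', 'Advanced_Features', 'auto_text'
--
--     if any(keyword in content or keyword in filename for keyword in [
--         'draft mode', 'workflow', 'turbocharge'
--     ]):
--         return 'LayOut', 'Performance_Stability', 'layout_performance'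
--
--     if any(keyword in content or keyword in filename for keyword in [
--         'floorplan', 'export', 'pdf'
--     ]):
--         return 'LayOut', 'Export_Printing', 'pdf_export'
--
--     return 'LayOut', 'Layout_Basics', 'interface_overview'
-- ===== SOURCE B (Python) =====
-- from typing import Tuple
--
-- # Flat keyword -> priority map; the answer is the RESULT row of the smallest
-- # priority among all matching keywords (3 = no match = default row).
-- _PRIORITY = {
--     'clipping mask': 0, 'template': 0, 'scrapbook': 0, 'auto text': 0,
--     'draft mode': 1, 'workflow': 1, 'turbocharge': 1,
--     'floorplan': 2, 'export': 2, 'pdf': 2,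
-- }
--
-- _RESULTS = [
--     ('LayOut', 'Advanced_Features', 'auto_text'),
--     ('LayOut', 'Performance_Stability', 'layout_performance'),
--     ('LayOut', 'Export_Printing', 'pdf_export'),
--     ('LayOut', 'Layout_Basics', 'interface_overview'),
-- ]
--
-- def _determine_layout_category(content: str, filename: str) -> Tuple[str, str, str]:
--     best = min((p for k, p in _PRIORITY.items()
--                 if k in content or k in filename), default=3)
--     return _RESULTS[best]
-- ===== Notes on version B (the rewrite author's own statement) =====
-- stated objective: alternative
-- what changed: Instead of staged first-match over per-category keyword lists, B flattens all keywords into one keyword->priority map, computes the minimum priority among all matching keywords in a single pass (default 3), and indexes a results table with it; correct because the minimum matched priority equals the first branch that fires.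
import Mathlib
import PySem

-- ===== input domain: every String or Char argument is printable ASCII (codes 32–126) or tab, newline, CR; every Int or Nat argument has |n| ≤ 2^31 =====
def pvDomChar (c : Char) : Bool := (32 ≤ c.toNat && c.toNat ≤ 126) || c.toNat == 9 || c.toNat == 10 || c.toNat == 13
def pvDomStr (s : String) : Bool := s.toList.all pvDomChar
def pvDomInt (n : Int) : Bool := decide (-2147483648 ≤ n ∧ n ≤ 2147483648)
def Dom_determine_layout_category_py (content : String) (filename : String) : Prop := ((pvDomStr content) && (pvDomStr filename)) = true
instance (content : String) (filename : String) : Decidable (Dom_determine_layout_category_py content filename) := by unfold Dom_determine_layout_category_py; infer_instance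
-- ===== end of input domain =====

-- B replaces staged first-match branches by a flat keyword->priority map, a single min-reduction over matching keywords, and a results table lookup (objective: alternative).


-- ===== PORT A =====
def determine_layout_category_py (content : String) (filename : String) : String × String × String :=
  if ["clipping mask", "template", "scrapbook", "auto text"].any
      (fun keyword => PySem.Str.isIn keyword content || PySem.Str.isIn keyword filename) then
    ("LayOut", "Advanced_Features", "auto_text")
  else if ["draft mode", "workflow", "turbocharge"].any
      (fun keyword => PySem.Str.isIn keyword content || PySem.Str.isIn keyword filename) then
    ("LayOut", "Performance_Stability", "layout_performance")
  else if ["floorplan", "export", "pdf"].any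
      (fun keyword => PySem.Str.isIn keyword content || PySem.Str.isIn keyword filename) then
    ("LayOut", "Export_Printing", "pdf_export")
  else
    ("LayOut", "Layout_Basics", "interface_overview")

-- ===== PORT B =====
-- flat keyword -> priority map (Source B's _PRIORITY, in insertion order)
def pvPriority : List (String × Nat) :=
  [("clipping mask", 0), ("template", 0), ("scrapbook", 0), ("auto text", 0),
   ("draft mode", 1), ("workflow", 1), ("turbocharge", 1),
   ("floorplan", 2), ("export", 2), ("pdf", 2)]

-- Source B's _RESULTS table, indexed by priority
def pvResults : List (String × String × String) :=
  [("LayOut", "Advanced_Features", "auto_text"),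
   ("LayOut", "Performance_Stability", "layout_performance"),
   ("LayOut", "Export_Printing", "pdf_export"),
   ("LayOut", "Layout_Basics", "interface_overview")]

def determine_layout_category_py_alt (content : String) (filename : String) : String × String × String :=
  -- priorities of all matching keywords, in map order (the generator expression, as a fold)
  let matched := pvPriority.foldr (fun kp acc =>
    if PySem.Str.isIn kp.1 content || PySem.Str.isIn kp.1 filename then kp.2 :: acc else acc) []
  -- Python's min(..., default=3): minimum of the list, 3 when empty
  let best : Nat :=
    match matched with
    | [] => 3
    | p :: ps => ps.foldl min p
  -- _RESULTS[best]: best is always 0..3, so plain in-range indexing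
  pvResults.getD best ("LayOut", "Layout_Basics", "interface_overview")

-- ===== PRECONDITION & SPEC =====
def Spec_determine_layout_category_py (content : String) (filename : String) (out : String × String × String) : Prop := out = determine_layout_category_py_alt content filename
instance (content : String) (filename : String) (out : String × String × String) : Decidable (Spec_determine_layout_category_py content filename out) := by unfold Spec_determine_layout_category_py; infer_instance

-- ===== CLAIM =====
def Claim_equal_determine_layout_category_py : Prop := ∀ (content : String) (filename : String), Dom_determine_layout_category_py content filename → Spec_determine_layout_category_py content filename (determine_layout_category_py content filename)

-- ===== LEMMAS AND PROOFS =====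

-- Both ports consult the input only through the ten Booleans "keyword in content
-- or keyword in filename"; abstracting those, the equation is a finite tautology.
theorem pv_bool : ∀ (b1 b2 b3 b4 b5 b6 b7 b8 b9 b10 : Bool),
    (if b1 || (b2 || (b3 || (b4 || false))) then
      (("LayOut", "Advanced_Features", "auto_text") : String × String × String)
    else if b5 || (b6 || (b7 || false)) then
      ("LayOut", "Performance_Stability", "layout_performance")
    else if b8 || (b9 || (b10 || false)) then
      ("LayOut", "Export_Printing", "pdf_export")
    else
      ("LayOut", "Layout_Basics", "interface_overview")) =
    (let m10 : List Nat := if b10 then 2 :: [] else []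
     let m9 := if b9 then 2 :: m10 else m10
     let m8 := if b8 then 2 :: m9 else m9
     let m7 := if b7 then 1 :: m8 else m8
     let m6 := if b6 then 1 :: m7 else m7
     let m5 := if b5 then 1 :: m6 else m6
     let m4 := if b4 then 0 :: m5 else m5
     let m3 := if b3 then 0 :: m4 else m4
     let m2 := if b2 then 0 :: m3 else m3
     let m1 := if b1 then 0 :: m2 else m2
     let best : Nat :=
       match m1 with
       | [] => 3
       | p :: ps => ps.foldl min p
     pvResults.getD best ("LayOut", "Layout_Basics", "interface_overview")) := by
  decide

-- ===== VERDICT =====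
theorem determine_layout_category_py_spec : Claim_equal_determine_layout_category_py := by
  intro content filename _
  unfold Spec_determine_layout_category_py determine_layout_category_py
    determine_layout_category_py_alt
  exact pv_bool
    (PySem.Str.isIn "clipping mask" content || PySem.Str.isIn "clipping mask" filename)
    (PySem.Str.isIn "template" content || PySem.Str.isIn "template" filename)
    (PySem.Str.isIn "scrapbook" content || PySem.Str.isIn "scrapbook" filename)
    (PySem.Str.isIn "auto text" content || PySem.Str.isIn "auto text" filename)
    (PySem.Str.isIn "draft mode" content || PySem.Str.isIn "draft mode" filename)
    (PySem.Str.isIn "workflow" content || PySem.Str.isIn "workflow" filename)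
    (PySem.Str.isIn "turbocharge" content || PySem.Str.isIn "turbocharge" filename)
    (PySem.Str.isIn "floorplan" content || PySem.Str.isIn "floorplan" filename)
    (PySem.Str.isIn "export" content || PySem.Str.isIn "export" filename)
    (PySem.Str.isIn "pdf" content || PySem.Str.isIn "pdf" filename)
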